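-- pv_equiv track=rewrite | github.com/bg668/knowledgeag | src/knowledgeag_card/agents/mock_knowledge_agent.py | _claim_groups
-- ===== SOURCE A (Python) =====
-- def _claim_groups(
--     claims: list[str],
--     structure: list[str],
--     claim_sections: dict[str, str],
-- ) -> list[tuple[str | None, list[str]]]:
--     clean_claims = [claim.strip() for claim in claims if claim and claim.strip()]
--     if structure and claim_sections:
--         groups: list[tuple[str | None, list[str]]] = []
--         for section in structure:
--             section_claims = [claim for claim in clean_claims if claim_sections.get(claim) == section]
--             groups.extend((section, chunk) for chunk in _chunks(section_claims))
--         if groups: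
--             return groups
--     return [(None, chunk) for chunk in _chunks(clean_claims)]
--
-- def _chunks(clean_claims: list[str]) -> list[list[str]]:
--     if len(clean_claims) < 3:
--         return []
--     groups: list[list[str]] = []
--     index = 0
--     while index < len(clean_claims):
--         remaining = len(clean_claims) - index
--         if remaining <= 7:
--             groups.append(clean_claims[index:])
--             break
--         groups.append(clean_claims[index : index + 5])
--         index += 5
--     return groups
-- ===== SOURCE B (Python) =====
-- def _claim_groups(claims, structure, claim_sections):
--     clean_claims = [s for s in (c.strip() for c in claims) if s]
--     if structure and claim_sections:
--         bucket = {}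
--         for claim in clean_claims:
--             key = claim_sections.get(claim)
--             if key is not None:
--                 bucket.setdefault(key, []).append(claim)
--         groups = [
--             (section, chunk)
--             for section in structure
--             for chunk in _chunks(bucket.get(section, []))
--         ]
--         if groups:
--             return groups
--     return [(None, chunk) for chunk in _chunks(clean_claims)]
--
--
-- def _chunks(clean_claims):
--     if len(clean_claims) < 3:
--         return []
--     return _split(clean_claims)
--
--
-- def _split(xs):
--     if len(xs) <= 7:
--         return [xs]
--     return [xs[:5]] + _split(xs[5:])
-- ===== Notes on version B (the rewrite author's own statement) =====
-- stated objective: faster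
-- what changed: B buckets the cleaned claims by their section in one dict-building pass and then looks each structure section up in O(1), instead of re-scanning the whole claim list for every section; chunking is a direct recursion instead of an index-driven while loop.
import Mathlib
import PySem

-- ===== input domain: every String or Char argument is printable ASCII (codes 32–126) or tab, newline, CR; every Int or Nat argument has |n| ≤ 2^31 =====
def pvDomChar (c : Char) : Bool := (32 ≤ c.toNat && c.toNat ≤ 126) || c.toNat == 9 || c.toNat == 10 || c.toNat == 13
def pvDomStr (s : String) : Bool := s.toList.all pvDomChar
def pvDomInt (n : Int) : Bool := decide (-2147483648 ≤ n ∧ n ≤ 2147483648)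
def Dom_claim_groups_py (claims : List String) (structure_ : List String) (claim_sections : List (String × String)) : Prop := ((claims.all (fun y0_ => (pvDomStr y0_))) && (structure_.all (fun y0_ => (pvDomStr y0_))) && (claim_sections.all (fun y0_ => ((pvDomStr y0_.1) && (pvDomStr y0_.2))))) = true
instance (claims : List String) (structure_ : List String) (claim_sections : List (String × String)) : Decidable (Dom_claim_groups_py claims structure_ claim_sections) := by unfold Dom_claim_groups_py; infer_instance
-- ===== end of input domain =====

-- B replaces A's per-section rescan of all claims by a single bucketing pass over the
-- claims (dict section -> claims) and a recursive chunker; objective: faster (asymptotic).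


-- ===== PORT A =====
-- _chunks: the while loop over `index`
def pvChunksALoop (xs : List String) (index : Nat) (acc : List (List String)) : List (List String) :=
  if index < xs.length then
    if xs.length - index ≤ 7 then
      acc ++ [PySem.List.slice xs (some (index : Int)) none]      -- clean_claims[index:], then break
    else
      pvChunksALoop xs (index + 5) (acc ++ [PySem.List.slice xs (some (index : Int)) (some ((index : Int) + 5))])
  else acc
termination_by xs.length - index

def pvChunksA (clean_claims : List String) : List (List String) :=
  if clean_claims.length < 3 then [] else pvChunksALoop clean_claims 0 []

def claim_groups_py (claims : List String) (structure_ : List String) (claim_sections : List (String × String)) : List (Option String × List String) :=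
  let clean_claims := (claims.filter (fun c => !(c == "") && !(PySem.Str.strip c == ""))).map PySem.Str.strip
  if structure_ ≠ [] ∧ claim_sections ≠ [] then
    let groups := structure_.foldl (fun acc section_ =>
      acc ++ (pvChunksA (clean_claims.filter (fun c => (PySem.Dict.mk claim_sections).get? c == some section_))).map
              (fun chunk => ((some section_ : Option String), chunk))) []
    if groups ≠ [] then groups
    else (pvChunksA clean_claims).map (fun chunk => ((none : Option String), chunk))
  else (pvChunksA clean_claims).map (fun chunk => ((none : Option String), chunk))

-- ===== PORT B =====
-- _split: the recursive chunker
def pvSplitB (xs : List String) : List (List String) :=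
  if xs.length ≤ 7 then [xs]
  else PySem.List.slice xs none (some 5) :: pvSplitB (PySem.List.slice xs (some 5) none)
termination_by xs.length
decreasing_by
  simp [PySem.List.slice_some_none, PySem.List.clampIdx]
  omega

def pvChunksB (clean_claims : List String) : List (List String) :=
  if clean_claims.length < 3 then [] else pvSplitB clean_claims

def claim_groups_py_alt (claims : List String) (structure_ : List String) (claim_sections : List (String × String)) : List (Option String × List String) :=
  let clean_claims := (claims.map PySem.Str.strip).filter (fun s => !(s == ""))
  if structure_ ≠ [] ∧ claim_sections ≠ [] then
    let bucket := clean_claims.foldl (fun d claim =>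
      match (PySem.Dict.mk claim_sections).get? claim with
      | some key => d.modify key [] (fun l => l ++ [claim])
      | none => d) PySem.Dict.empty
    let groups := structure_.flatMap (fun section_ =>
      (pvChunksB (bucket.getD section_ [])).map (fun chunk => ((some section_ : Option String), chunk)))
    if groups ≠ [] then groups
    else (pvChunksB clean_claims).map (fun chunk => ((none : Option String), chunk))
  else (pvChunksB clean_claims).map (fun chunk => ((none : Option String), chunk))

-- ===== PRECONDITION & SPEC =====
def Spec_claim_groups_py (claims : List String) (structure_ : List String) (claim_sections : List (String × String)) (out : List (Option String × List String)) : Prop := out = claim_groups_py_alt claims structure_ claim_sections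
instance (claims : List String) (structure_ : List String) (claim_sections : List (String × String)) (out : List (Option String × List String)) : Decidable (Spec_claim_groups_py claims structure_ claim_sections out) := by unfold Spec_claim_groups_py; infer_instance

-- ===== CLAIM (what is proved, stated in full; the proofs are below) =====
def Claim_equal_claim_groups_py : Prop := ∀ (claims : List String) (structure_ : List String) (claim_sections : List (String × String)), Dom_claim_groups_py claims structure_ claim_sections → Spec_claim_groups_py claims structure_ claim_sections (claim_groups_py claims structure_ claim_sections)

-- ===== LEMMAS AND PROOFS =====

-- the two cleaned-claim lists coincide
lemma pv_clean_eq (claims : List String) :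
    (claims.filter (fun c => !(c == "") && !(PySem.Str.strip c == ""))).map PySem.Str.strip
      = (claims.map PySem.Str.strip).filter (fun s => !(s == "")) := by
  rw [List.filter_map]
  congr 1
  apply List.filter_congr
  intro c _
  by_cases h : c = ""
  · subst h; decide
  · simp [Function.comp, h]

-- A's while loop computes B's recursion on the tail starting at `index`
lemma pv_chunksALoop_eq (xs : List String) : ∀ (n i : Nat) (acc : List (List String)),
    xs.length - i = n → i < xs.length →
    pvChunksALoop xs i acc = acc ++ pvSplitB (xs.drop i) := by
  intro n
  induction n using Nat.strong_induction_on with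
  | _ n ih =>
    intro i acc hn h
    rw [pvChunksALoop]
    conv_rhs => rw [pvSplitB]
    have hlen : (xs.drop i).length = xs.length - i := List.length_drop ..
    by_cases hr : xs.length - i ≤ 7
    · rw [if_pos h, if_pos hr, if_pos (by omega), PySem.List.slice_from_natCast]
    · rw [if_pos h, if_neg hr, if_neg (by omega)]
      have h5 : ((i : Int) + 5) = ((i + 5 : Nat) : Int) := by push_cast; ring
      rw [h5, PySem.List.slice_natCast]
      have hs1 : PySem.List.slice (xs.drop i) none (some 5) = (xs.drop i).take 5 := by
        simp [pysem]
      have hs2 : PySem.List.slice (xs.drop i) (some 5) = xs.drop (i + 5) := by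
        simp [pysem, List.drop_drop]
      have ht : ((i + 5) - i) = 5 := by omega
      rw [ht, hs1, hs2,
          ih (xs.length - (i + 5)) (by omega) (i + 5) (acc ++ [(xs.drop i).take 5]) rfl (by omega)]
      simp

lemma pv_chunks_eq (xs : List String) : pvChunksA xs = pvChunksB xs := by
  unfold pvChunksA pvChunksB
  by_cases h : xs.length < 3
  · rw [if_pos h, if_pos h]
  · rw [if_neg h, if_neg h, pv_chunksALoop_eq xs (xs.length) 0 [] rfl (by omega)]
    simp

-- the bucket built by B's single pass holds, at each key, exactly A's per-section filter
lemma pv_bucket_getD (cs : List (String × String)) (clean : List String)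
    (d : PySem.Dict String (List String)) (k : String) :
    (clean.foldl (fun d claim =>
        match (PySem.Dict.mk cs).get? claim with
        | some key => d.modify key [] (fun l => l ++ [claim])
        | none => d) d).getD k []
      = d.getD k [] ++ clean.filter (fun c => (PySem.Dict.mk cs).get? c == some k) := by
  induction clean generalizing d with
  | nil => simp
  | cons c t ih =>
    simp only [List.foldl_cons, List.filter_cons]
    cases hg : (PySem.Dict.mk cs).get? c with
    | none => simp [ih]
    | some key =>
      by_cases hk : key = k
      · subst hk
        rw [ih]
        simp [PySem.Dict.getD_modify_self]
      · rw [ih, PySem.Dict.getD_modify_of_ne _ [] _ (Ne.symm hk)]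
        simp [hk]

-- A's per-section re-filter loop equals B's flatMap over the bucket
lemma pv_groups_eq (clean : List String) (structure_ : List String) (cs : List (String × String)) :
    structure_.foldl (fun acc section_ =>
        acc ++ (pvChunksA (clean.filter (fun c => (PySem.Dict.mk cs).get? c == some section_))).map
                (fun chunk => ((some section_ : Option String), chunk))) []
      = structure_.flatMap (fun section_ =>
          (pvChunksB ((clean.foldl (fun d claim =>
              match (PySem.Dict.mk cs).get? claim with
              | some key => d.modify key [] (fun l => l ++ [claim])
              | none => d) PySem.Dict.empty).getD section_ [])).map
            (fun chunk => ((some section_ : Option String), chunk))) := by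
  rw [PySem.List.foldl_append_eq_flatMap, List.nil_append]
  congr 1
  funext section_
  rw [pv_bucket_getD, PySem.Dict.getD_empty, List.nil_append, pv_chunks_eq]

-- ===== VERDICT (by name: the statement is the Claim_ definition above) =====
theorem claim_groups_py_spec : Claim_equal_claim_groups_py := by
  intro claims structure_ claim_sections _
  unfold Spec_claim_groups_py claim_groups_py claim_groups_py_alt
  rw [pv_clean_eq]
  by_cases hg : structure_ ≠ [] ∧ claim_sections ≠ []
  · simp only [if_pos hg]
    rw [pv_groups_eq, pv_chunks_eq]
  · simp only [if_neg hg, pv_chunks_eq]
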